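-- pv_equiv track=rewrite | github.com/henrybackman/adventofcode_2023 | day_8_part_2.py | find_repeating_cycle
-- ===== SOURCE A (Python) =====
-- def find_repeating_cycle(nodes, directions, node):
--     visited_node_steps = dict()
--     step = -1
--     current_node = node
--     step_count = 0
--     visited_node_steps[(current_node, len(directions) - 1)] = None # if starting node is in the loop, then it would be the last step of directions
--     while True:
--         step += 1
--         step_count += 1
--         try:
--             direction = directions[step]
--         except IndexError:
--             step = 0
--             direction = directions[step]
--
--         current_node = nodes[current_node][0] if direction == 'L' else nodes[current_node][1]
--         visited_node_step = (current_node, step)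
--         if visited_node_step in visited_node_steps: # loop started
--             break
--         visited_node_steps[visited_node_step] = None # only the key matters
--     loop_start = 0
--     for i, visited_node_step in enumerate(visited_node_steps):
--         visited_node, visited_step = visited_node_step
--         if visited_node == current_node and visited_step == step:
--             loop_start = i
--             break
--     repeating_cycle = list(visited_node_steps)[loop_start:]
--     return repeating_cycle, loop_start
-- ===== SOURCE B (Python) =====
-- def find_repeating_cycle(nodes, directions, node):
--     # Floyd tortoise-hare cycle detection: O(1) extra state instead of a
--     # visited-dict; rebuilds the repeated segment at the end.
--     n = len(directions)
--
--     def step(state):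
--         cur, s = state
--         s = (s + 1) % n
--         nxt = nodes[cur][0] if directions[s] == 'L' else nodes[cur][1]
--         return (nxt, s)
--
--     start = (node, n - 1)
--     tortoise = step(start)
--     hare = step(tortoise)
--     while tortoise != hare:
--         tortoise = step(tortoise)
--         hare = step(step(hare))
--     loop_start = 0
--     tortoise = start
--     while tortoise != hare:
--         tortoise = step(tortoise)
--         hare = step(hare)
--         loop_start += 1
--     cycle_len = 1
--     hare = step(tortoise)
--     while tortoise != hare:
--         hare = step(hare)
--         cycle_len += 1
--     repeating_cycle = []
--     state = tortoise
--     for _ in range(cycle_len):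
--         repeating_cycle.append(state)
--         state = step(state)
--     return repeating_cycle, loop_start
-- ===== Notes on version B (the rewrite author's own statement) =====
-- stated objective: alternative
-- what changed: B replaces A's visited-dict walk (hash every (node,step) state, break on membership, then rescan for the index) with Floyd's tortoise-and-hare cycle detection in O(1) extra state: a two-speed meeting loop, a loop-start loop, a cycle-length loop, and a final pass that rebuilds the repeated segment.
-- outside the precondition, e.g. on find_repeating_cycle({'A': ('B', 'B'), 'B': ('C', 'C')}, ['L'], 'A'): A raises KeyError, B raises KeyError
import Mathlib
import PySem

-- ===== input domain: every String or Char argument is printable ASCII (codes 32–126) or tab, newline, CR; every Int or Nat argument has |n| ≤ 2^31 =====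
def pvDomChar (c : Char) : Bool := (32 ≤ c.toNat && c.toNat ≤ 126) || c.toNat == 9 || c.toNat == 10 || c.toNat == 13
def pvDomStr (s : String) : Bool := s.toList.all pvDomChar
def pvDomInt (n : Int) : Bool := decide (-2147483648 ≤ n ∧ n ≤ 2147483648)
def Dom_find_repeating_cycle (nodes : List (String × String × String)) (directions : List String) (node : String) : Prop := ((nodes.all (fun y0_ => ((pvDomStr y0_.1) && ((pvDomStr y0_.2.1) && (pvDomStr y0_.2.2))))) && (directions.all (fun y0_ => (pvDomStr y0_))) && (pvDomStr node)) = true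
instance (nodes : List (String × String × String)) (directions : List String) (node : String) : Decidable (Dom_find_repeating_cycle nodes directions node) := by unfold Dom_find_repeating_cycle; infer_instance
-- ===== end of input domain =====

-- B replaces A's visited-dict walk with Floyd's tortoise-and-hare cycle detection (O(1) extra
-- state; three meeting loops plus a rebuild pass); equality of return values is proved on Pre_.

-- ===== PORT A =====
-- the Python parameter `nodes` is dict[str, (str, str)], passed per the type convention as a list
-- of triples; this rebuilds the dict exactly as Python's dict(...) does (later duplicate wins)
def pvNodesDict (nodes : List (String × String × String)) : PySem.Dict String (String × String) :=
  PySem.Dict.ofList (nodes.map (fun t => (t.1, (t.2.1, t.2.2))))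

-- A's post-loop: loop_start = 0; for i, k in enumerate(keys): if k == target: loop_start = i; break
def frA_scan : List (String × Int) → (String × Int) → Int → Int
  | [], _, _ => 0
  | k :: rest, t, i => if k = t then i else frA_scan rest t (i + 1)

-- A's `while True` loop; fuel only makes it total (enough fuel is supplied at the call site).
-- `nd.get?` is nodes[current] (getD arm unreachable under Pre_); directions[step+1] with
-- try/except IndexError is the match on pyGet?; the final [loop_start:] slice with a
-- nonnegative in-range index is `drop`.
def frA_loop (nd : PySem.Dict String (String × String)) (directions : List String) :
    Nat → PySem.Dict (String × Int) Unit → String → Int → (List (String × Int)) × Int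
  | 0, _, _, _ => ([], 0)
  | fuel + 1, visited, current, step =>
    let sd : Int × String :=
      match PySem.List.pyGet? directions (step + 1) with
      | some d => (step + 1, d)
      | none => (0, (PySem.List.pyGet? directions 0).getD "")
    let lr := (nd.get? current).getD ("", "")
    let current' := if sd.2 = "L" then lr.1 else lr.2
    let st := (current', sd.1)
    if visited.contains st then
      let ls := frA_scan visited.keys st 0
      (visited.keys.drop ls.toNat, ls)
    else
      frA_loop nd directions fuel (visited.insert st ()) current' sd.1

def find_repeating_cycle (nodes : List (String × String × String)) (directions : List String) (node : String) : (List (String × Int)) × Int :=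
  frA_loop (pvNodesDict nodes) directions
    ((2 * nodes.length + 2) * (directions.length + 1) + 3)
    ((PySem.Dict.empty).insert (node, (directions.length : Int) - 1) ())
    node (-1)

-- ===== PORT B =====
-- Source B's inner `step` closure (modular index arithmetic + one dict lookup)
def fStep (nd : PySem.Dict String (String × String)) (directions : List String) (n : Int)
    (state : String × Int) : String × Int :=
  let s := PySem.Int.mod (state.2 + 1) n
  let lr := (nd.get? state.1).getD ("", "")
  let nxt := if (PySem.List.pyGet? directions s).getD "" = "L" then lr.1 else lr.2
  (nxt, s)

-- Source B's first while loop (tortoise one step, hare two); fuel only makes it total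
def floyd1 (F : (String × Int) → (String × Int)) :
    Nat → (String × Int) → (String × Int) → (String × Int)
  | 0, _, h => h
  | fuel + 1, t, h => if t = h then h else floyd1 F fuel (F t) (F (F h))

-- Source B's second while loop: find loop_start
def floyd2 (F : (String × Int) → (String × Int)) :
    Nat → (String × Int) → (String × Int) → Int → (String × Int) × Int
  | 0, t, _, mu => (t, mu)
  | fuel + 1, t, h, mu => if t = h then (t, mu) else floyd2 F fuel (F t) (F h) (mu + 1)

-- Source B's third while loop: find cycle_len
def floyd3 (F : (String × Int) → (String × Int)) :
    Nat → (String × Int) → (String × Int) → Int → Int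
  | 0, _, _, lam => lam
  | fuel + 1, t, h, lam => if t = h then lam else floyd3 F fuel t (F h) (lam + 1)

-- Source B's final `for _ in range(cycle_len)` rebuild pass
def buildCycle (F : (String × Int) → (String × Int)) : Nat → (String × Int) → List (String × Int)
  | 0, _ => []
  | k + 1, st => st :: buildCycle F k (F st)

def find_repeating_cycle_alt (nodes : List (String × String × String)) (directions : List String) (node : String) : (List (String × Int)) × Int :=
  let n : Int := (directions.length : Int)
  let F := fStep (pvNodesDict nodes) directions n
  let fuel := nodes.length * directions.length + 2
  let start : String × Int := (node, n - 1)
  let tortoise := F start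
  let hare := F tortoise
  let hare' := floyd1 F fuel tortoise hare
  let tm := floyd2 F fuel start hare' 0
  let lam := floyd3 F fuel tm.1 (F tm.1) 1
  (buildCycle F lam.toNat tm.1, tm.2)

-- ===== PRECONDITION & SPEC =====
-- Pre_ = the function's natural domain: a nonempty direction list (else A's except-branch
-- re-raises IndexError) and a closed node map containing the start node (else the walk can hit a
-- KeyError). This is slightly narrower than "A returns": A also returns on maps with dangling
-- references that the walk from `node` happens to avoid (see the cite in claim.json).
def Pre_find_repeating_cycle (nodes : List (String × String × String)) (directions : List String) (node : String) : Prop :=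
  directions ≠ [] ∧ node ∈ nodes.map (·.1) ∧
    ∀ t ∈ nodes, t.2.1 ∈ nodes.map (·.1) ∧ t.2.2 ∈ nodes.map (·.1)
instance (nodes : List (String × String × String)) (directions : List String) (node : String) : Decidable (Pre_find_repeating_cycle nodes directions node) := by unfold Pre_find_repeating_cycle; infer_instance

def pvWitness_find_repeating_cycle : (List (String × String × String)) × List String × String :=
  ([("AAA", "BBB", "BBB"), ("BBB", "AAA", "BBB")], ["L", "R"], "AAA")

def Spec_find_repeating_cycle (nodes : List (String × String × String)) (directions : List String) (node : String) (out : (List (String × Int)) × Int) : Prop := out = find_repeating_cycle_alt nodes directions node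
instance (nodes : List (String × String × String)) (directions : List String) (node : String) (out : (List (String × Int)) × Int) : Decidable (Spec_find_repeating_cycle nodes directions node out) := by unfold Spec_find_repeating_cycle; infer_instance

-- ===== CLAIM (what is proved, stated in full; the proofs are below) =====
def Claim_equal_find_repeating_cycle : Prop := ∀ (nodes : List (String × String × String)) (directions : List String) (node : String), Dom_find_repeating_cycle nodes directions node → Pre_find_repeating_cycle nodes directions node → Spec_find_repeating_cycle nodes directions node (find_repeating_cycle nodes directions node)

-- ===== LEMMAS AND PROOFS =====

-- the pure orbit of the walk: state after k steps
def seqF (F : (String × Int) → (String × Int)) (s0 : String × Int) (k : Nat) : String × Int :=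
  F^[k] s0

theorem seqF_succ (F : (String × Int) → (String × Int)) (s0 : String × Int) (k : Nat) :
    seqF F s0 (k + 1) = F (seqF F s0 k) := Function.iterate_succ_apply' F k s0

theorem seqF_shift (F : (String × Int) → (String × Int)) (s0 : String × Int) (a d : Nat) :
    seqF F s0 (a + d) = F^[d] (seqF F s0 a) := by
  simp [seqF, Nat.add_comm a d, Function.iterate_add_apply]

-- ρ-shape theory: F2 period shift
theorem per_shift (F : (String × Int) → (String × Int)) (s0 : String × Int) (μ lam : Nat)
    (hcyc : seqF F s0 (μ + lam) = seqF F s0 μ) :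
    ∀ i, μ ≤ i → seqF F s0 (i + lam) = seqF F s0 i := by
  intro i hi
  induction i, hi using Nat.le_induction with
  | base => exact hcyc
  | succ i hi ih =>
    have : i + 1 + lam = (i + lam) + 1 := by omega
    rw [this, seqF_succ F s0 (i + lam), ih, ← seqF_succ F s0 i]

theorem per_mul (F : (String × Int) → (String × Int)) (s0 : String × Int) (μ lam : Nat)
    (hcyc : seqF F s0 (μ + lam) = seqF F s0 μ) :
    ∀ c i, μ ≤ i → seqF F s0 (i + c * lam) = seqF F s0 i := by
  intro c
  induction c with
  | zero => simp
  | succ c ih =>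
    intro i hi
    have h1 : i + (c + 1) * lam = (i + c * lam) + lam := by ring
    rw [h1, per_shift F s0 μ lam hcyc _ (by omega), ih i hi]

theorem per_reduce (F : (String × Int) → (String × Int)) (s0 : String × Int) (μ lam : Nat)
    (hlam : 1 ≤ lam) (hcyc : seqF F s0 (μ + lam) = seqF F s0 μ) :
    ∀ i, μ ≤ i → seqF F s0 i = seqF F s0 (μ + (i - μ) % lam) := by
  intro i hi
  have h1 : i = (μ + (i - μ) % lam) + ((i - μ) / lam) * lam := by
    rw [Nat.mul_comm]
    have := Nat.div_add_mod (i - μ) lam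
    omega
  conv_lhs => rw [h1]
  exact per_mul F s0 μ lam hcyc _ _ (by omega)

-- repeated application of a fixed gap
theorem gap_iter (F : (String × Int) → (String × Int)) (s0 : String × Int) (i d : Nat)
    (h : seqF F s0 (i + d) = seqF F s0 i) :
    ∀ t, seqF F s0 (i + t * d) = seqF F s0 i := by
  intro t
  induction t with
  | zero => simp
  | succ t ih =>
    have h1 : i + (t + 1) * d = (i + t * d) + d := by ring
    rw [h1, seqF_shift, ih, ← seqF_shift, h]

-- F5a: any repeated index lies at or after μ
theorem rho_lower (F : (String × Int) → (String × Int)) (s0 : String × Int) (μ lam : Nat)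
    (hlam : 1 ≤ lam) (hcyc : seqF F s0 (μ + lam) = seqF F s0 μ)
    (hinj : ∀ i j, i < j → j < μ + lam → seqF F s0 i ≠ seqF F s0 j)
    (i j : Nat) (hij : i < j) (heq : seqF F s0 i = seqF F s0 j) : μ ≤ i := by
  by_contra hi
  push Not at hi
  have hd : seqF F s0 (i + (j - i)) = seqF F s0 i := by
    have : i + (j - i) = j := by omega
    rw [this, heq]
  have hb : seqF F s0 (i + μ * (j - i)) = seqF F s0 i := gap_iter F s0 i (j - i) hd μ
  have hbμ : μ ≤ i + μ * (j - i) := by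
    have : 1 ≤ j - i := by omega
    calc μ ≤ μ * (j - i) := Nat.le_mul_of_pos_right μ (by omega)
    _ ≤ i + μ * (j - i) := by omega
  have ha := per_reduce F s0 μ lam hlam hcyc _ hbμ
  have hlt : μ + (i + μ * (j - i) - μ) % lam < μ + lam := by
    have := Nat.mod_lt (i + μ * (j - i) - μ) (show 0 < lam by omega)
    omega
  exact hinj i _ (by omega) hlt (hb.symm.trans ha)

-- F5b: the gap of any repeat at/after μ is a multiple of lam
theorem rho_dvd (F : (String × Int) → (String × Int)) (s0 : String × Int) (μ lam : Nat)
    (hlam : 1 ≤ lam) (hcyc : seqF F s0 (μ + lam) = seqF F s0 μ)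
    (hinj : ∀ i j, i < j → j < μ + lam → seqF F s0 i ≠ seqF F s0 j)
    (i j : Nat) (hμi : μ ≤ i) (hij : i ≤ j) (heq : seqF F s0 i = seqF F s0 j) :
    lam ∣ (j - i) := by
  have hμj : μ ≤ j := le_trans hμi hij
  have ha := per_reduce F s0 μ lam hlam hcyc i hμi
  have hb := per_reduce F s0 μ lam hlam hcyc j hμj
  have hab : seqF F s0 (μ + (i - μ) % lam) = seqF F s0 (μ + (j - μ) % lam) := by
    rw [← ha, ← hb, heq]
  have hmod : (i - μ) % lam = (j - μ) % lam := by
    by_contra hne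
    rcases Nat.lt_or_ge ((i - μ) % lam) ((j - μ) % lam) with h | h
    · exact hinj _ _ (by omega)
        (by have := Nat.mod_lt (j - μ) (show 0 < lam by omega); omega) hab
    · have h' : (j - μ) % lam < (i - μ) % lam := by omega
      exact hinj _ _ (by omega)
        (by have := Nat.mod_lt (i - μ) (show 0 < lam by omega); omega) hab.symm
  have : (i - μ) ≡ (j - μ) [MOD lam] := hmod
  have hdvd : lam ∣ (j - μ) - (i - μ) := (Nat.modEq_iff_dvd' (by omega)).mp this
  have : (j - μ) - (i - μ) = j - i := by omega
  rwa [this] at hdvd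

-- converse: any lam-multiple gap at/after μ repeats
theorem rho_eq_of_dvd (F : (String × Int) → (String × Int)) (s0 : String × Int) (μ lam : Nat)
    (hcyc : seqF F s0 (μ + lam) = seqF F s0 μ)
    (i d : Nat) (hμi : μ ≤ i) (hd : lam ∣ d) : seqF F s0 (i + d) = seqF F s0 i := by
  obtain ⟨c, rfl⟩ := hd
  rw [Nat.mul_comm]
  exact per_mul F s0 μ lam hcyc c i hμi

-- === correctness of Source B's four loops relative to the orbit ===

theorem floyd1_eq (F : (String × Int) → (String × Int)) (s0 : String × Int) (μ lam : Nat)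
    (hlam : 1 ≤ lam) (hcyc : seqF F s0 (μ + lam) = seqF F s0 μ)
    (hinj : ∀ i j, i < j → j < μ + lam → seqF F s0 i ≠ seqF F s0 j) :
    ∀ (fuel i : Nat), 1 ≤ i → i ≤ lam * (μ / lam + 1) → lam * (μ / lam + 1) + 1 ≤ fuel + i →
      ∃ j, 1 ≤ j ∧ lam ∣ j ∧
        floyd1 F fuel (seqF F s0 i) (seqF F s0 (2 * i)) = seqF F s0 (2 * j) := by
  intro fuel
  induction fuel with
  | zero => intro i h1 h2 h3; omega
  | succ fuel ih =>
    intro i h1 h2 h3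
    rw [floyd1]
    by_cases hmeet : seqF F s0 i = seqF F s0 (2 * i)
    · rw [if_pos hmeet]
      have hμi : μ ≤ i := rho_lower F s0 μ lam hlam hcyc hinj i (2 * i) (by omega) hmeet
      have hdvd : lam ∣ i := by
        have := rho_dvd F s0 μ lam hlam hcyc hinj i (2 * i) hμi (by omega) hmeet
        simpa [Nat.two_mul, Nat.add_sub_cancel] using this
      exact ⟨i, h1, hdvd, rfl⟩
    · rw [if_neg hmeet]
      have hi0 : i < lam * (μ / lam + 1) := by
        rcases Nat.lt_or_ge i (lam * (μ / lam + 1)) with h | h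
        · exact h
        · exfalso
          apply hmeet
          have hμle : μ ≤ lam * (μ / lam + 1) := by
            have := Nat.div_add_mod μ lam
            have := Nat.mod_lt μ (show 0 < lam by omega)
            nlinarith
          have hle : μ ≤ i := le_trans hμle (by omega)
          have heqi : i = lam * (μ / lam + 1) := by omega
          have : seqF F s0 (i + i) = seqF F s0 i :=
            rho_eq_of_dvd F s0 μ lam hcyc i i hle (heqi ▸ Dvd.intro _ rfl)
          rw [Nat.two_mul, this]
      have ht : F (seqF F s0 i) = seqF F s0 (i + 1) := (seqF_succ F s0 i).symm
      have hh : F (F (seqF F s0 (2 * i))) = seqF F s0 (2 * (i + 1)) := by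
        rw [← seqF_succ F s0 (2 * i), ← seqF_succ F s0 (2 * i + 1)]
        congr 1
      rw [ht, hh]
      exact ih (i + 1) (by omega) (by omega) (by omega)

theorem floyd2_eq (F : (String × Int) → (String × Int)) (s0 : String × Int) (μ lam : Nat)
    (hlam : 1 ≤ lam) (hcyc : seqF F s0 (μ + lam) = seqF F s0 μ)
    (hinj : ∀ i j, i < j → j < μ + lam → seqF F s0 i ≠ seqF F s0 j)
    (c : Nat) (hc : 1 ≤ c) (hcd : lam ∣ c) :
    ∀ (fuel t : Nat), t ≤ μ → μ + 1 ≤ fuel + t →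
      floyd2 F fuel (seqF F s0 t) (seqF F s0 (c + t)) (t : Int) = (seqF F s0 μ, (μ : Int)) := by
  intro fuel
  induction fuel with
  | zero => intro t h1 h2; omega
  | succ fuel ih =>
    intro t h1 h2
    rw [floyd2]
    by_cases ht : t = μ
    · subst ht
      have hmeet : seqF F s0 t = seqF F s0 (c + t) := by
        rw [Nat.add_comm c t]
        exact (rho_eq_of_dvd F s0 t lam hcyc t c le_rfl hcd).symm
      rw [if_pos hmeet]
    · have htlt : t < μ := by omega
      have hmeet : ¬ (seqF F s0 t = seqF F s0 (c + t)) := by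
        intro heq
        have := rho_lower F s0 μ lam hlam hcyc hinj t (c + t) (by omega) heq
        omega
      rw [if_neg hmeet, ← seqF_succ F s0 t]
      have hh : F (seqF F s0 (c + t)) = seqF F s0 (c + (t + 1)) := by
        rw [← seqF_succ F s0 (c + t)]; congr 1
      have hcast : (t : Int) + 1 = ((t + 1 : Nat) : Int) := by push_cast; ring
      rw [hh, hcast]
      exact ih (t + 1) (by omega) (by omega)

theorem floyd3_eq (F : (String × Int) → (String × Int)) (s0 : String × Int) (μ lam : Nat)
    (hlam : 1 ≤ lam) (hcyc : seqF F s0 (μ + lam) = seqF F s0 μ)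
    (hinj : ∀ i j, i < j → j < μ + lam → seqF F s0 i ≠ seqF F s0 j) :
    ∀ (fuel p : Nat), 1 ≤ p → p ≤ lam → lam + 1 ≤ fuel + p →
      floyd3 F fuel (seqF F s0 μ) (seqF F s0 (μ + p)) (p : Int) = (lam : Int) := by
  intro fuel
  induction fuel with
  | zero => intro p h1 h2 h3; omega
  | succ fuel ih =>
    intro p h1 h2 h3
    rw [floyd3]
    by_cases hp : p = lam
    · subst hp
      rw [if_pos hcyc.symm]
    · have hplt : p < lam := by omega
      have hmeet : ¬ (seqF F s0 μ = seqF F s0 (μ + p)) := by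
        intro heq
        have hdvd := rho_dvd F s0 μ lam hlam hcyc hinj μ (μ + p) le_rfl (by omega) heq
        have : lam ∣ p := by simpa using hdvd
        have := Nat.le_of_dvd (by omega) this
        omega
      rw [if_neg hmeet]
      have hh : F (seqF F s0 (μ + p)) = seqF F s0 (μ + (p + 1)) := by
        rw [← seqF_succ F s0 (μ + p)]; congr 1
      have hcast : (p : Int) + 1 = ((p + 1 : Nat) : Int) := by push_cast; ring
      rw [hh, hcast]
      exact ih (p + 1) (by omega) (by omega) (by omega)

theorem buildCycle_eq (F : (String × Int) → (String × Int)) (s0 : String × Int) :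
    ∀ (k t : Nat), buildCycle F k (seqF F s0 t) = (List.range k).map (fun j => seqF F s0 (t + j)) := by
  intro k
  induction k with
  | zero => intro t; simp [buildCycle]
  | succ k ih =>
    intro t
    rw [buildCycle, ← seqF_succ F s0 t, ih (t + 1), List.range_succ_eq_map]
    simp only [List.map_cons, List.map_map, Nat.add_zero]
    congr 1
    apply List.map_congr_left
    intro j _
    simp [Function.comp]
    congr 1
    omega

-- === the reference dict-walk (A's loop rewritten with modular arithmetic; proof-side only) ===

def refLoop (F : (String × Int) → (String × Int)) :
    Nat → PySem.Dict (String × Int) Int → (String × Int) → (List (String × Int)) × Int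
  | 0, _, _ => ([], 0)
  | fuel + 1, seen, state =>
    if seen.contains state then
      let ls := seen.getD state 0
      (seen.keys.drop ls.toNat, ls)
    else
      refLoop F fuel (seen.insert state (seen.size : Int)) (F state)

def dictA (L : List (String × Int)) : PySem.Dict (String × Int) Unit :=
  PySem.Dict.mk (L.map (fun k => (k, ())))
def dictB (L : List (String × Int)) (j : Nat) : PySem.Dict (String × Int) Int :=
  PySem.Dict.mk ((L.zipIdx j).map (fun p => (p.1, (p.2 : Int))))

theorem keys_dictA (L : List (String × Int)) : (dictA L).keys = L := by
  simp [dictA, PySem.Dict.keys_mk, Function.comp_def]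
theorem keys_dictB (L : List (String × Int)) (j : Nat) : (dictB L j).keys = L := by
  simp [dictB, PySem.Dict.keys_mk, Function.comp_def]
theorem contains_dictA (L : List (String × Int)) (s : String × Int) :
    (dictA L).contains s = decide (s ∈ L) := by
  rw [PySem.Dict.contains_eq_decide_mem_keys, keys_dictA]
theorem contains_dictB (L : List (String × Int)) (j : Nat) (s : String × Int) :
    (dictB L j).contains s = decide (s ∈ L) := by
  rw [PySem.Dict.contains_eq_decide_mem_keys, keys_dictB]
theorem insert_dictA (L : List (String × Int)) (s : String × Int) (h : s ∉ L) :
    (dictA L).insert s () = dictA (L ++ [s]) := by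
  apply PySem.Dict.ext
  rw [PySem.Dict.items_insert_of_not_contains _ _ (by simp [contains_dictA, h])]
  simp [dictA]
theorem insert_dictB (L : List (String × Int)) (s : String × Int) (h : s ∉ L) :
    (dictB L 0).insert s ((dictB L 0).size : Int) = dictB (L ++ [s]) 0 := by
  apply PySem.Dict.ext
  rw [PySem.Dict.items_insert_of_not_contains _ _ (by simp [contains_dictB, h])]
  have hsize : (dictB L 0).size = L.length := by
    simp [dictB, PySem.Dict.size]
  rw [hsize]
  simp [dictB, List.zipIdx_append]
theorem pyGet?_total {xs : List String} {i : Int} (h0 : 0 ≤ i) (h1 : i < (xs.length : Int)) :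
    ∃ d, PySem.List.pyGet? xs i = some d := by
  unfold PySem.List.pyGet? PySem.List.pyIdx?
  rw [if_pos h0, if_pos h1]
  have hlt : i.toNat < xs.length := by omega
  exact ⟨xs[i.toNat], by simp [List.getElem?_eq_getElem hlt]⟩
theorem pyGet?_oob {xs : List String} {i : Int} (h0 : 0 ≤ i) (h1 : (xs.length : Int) ≤ i) :
    PySem.List.pyGet? xs i = none := by
  unfold PySem.List.pyGet? PySem.List.pyIdx?
  rw [if_pos h0, if_neg (by omega)]
  rfl

-- value stored in dictB for the i-th key of a duplicate-free key list
theorem getD_dictB_idx :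
    ∀ (L : List (String × Int)) (j i : Nat) (hi : i < L.length), L.Nodup →
      (dictB L j).getD L[i] 0 = ((j + i : Nat) : Int)
  | [], _, i, hi, _ => by simp at hi
  | k :: rest, j, i, hi, hnd => by
    have hz : (k :: rest).zipIdx j = (k, j) :: rest.zipIdx (j + 1) := List.zipIdx_cons
    match i with
    | 0 =>
      simp [dictB, hz, PySem.Dict.getD_eq_get?_getD, PySem.Dict.get?_mk_cons]
    | i + 1 =>
      have hi' : i < rest.length := by simpa using hi
      have hne : k ≠ rest[i] := by
        intro h
        exact (List.nodup_cons.mp hnd).1 (h ▸ List.getElem_mem hi')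
      have hrec := getD_dictB_idx rest (j + 1) i hi' (List.nodup_cons.mp hnd).2
      have hL : (k :: rest)[i + 1] = rest[i] := by simp
      rw [hL]
      simp only [dictB, hz, List.map_cons, PySem.Dict.getD_eq_get?_getD,
        PySem.Dict.get?_mk_cons] at hrec ⊢
      rw [if_neg (by simpa using hne)]
      rw [hrec]
      congr 1
      omega

-- the reference loop computes (orbit[μ:m], μ)
theorem refLoop_spec (F : (String × Int) → (String × Int)) (s0 : String × Int) (μ lam : Nat)
    (hlam : 1 ≤ lam) (hcyc : seqF F s0 (μ + lam) = seqF F s0 μ)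
    (hinj : ∀ i j, i < j → j < μ + lam → seqF F s0 i ≠ seqF F s0 j) :
    ∀ (fuel k : Nat), k ≤ μ + lam → μ + lam + 1 ≤ fuel + k →
      refLoop F fuel (dictB ((List.range k).map (seqF F s0)) 0) (seqF F s0 k) =
        (((List.range (μ + lam)).map (seqF F s0)).drop μ, (μ : Int)) := by
  intro fuel
  induction fuel with
  | zero => intro k h1 h2; omega
  | succ fuel ih =>
    intro k h1 h2
    rw [refLoop]
    by_cases hk : k = μ + lam
    · subst hk
      set L := (List.range (μ + lam)).map (seqF F s0) with hL
      have hmem : seqF F s0 (μ + lam) ∈ L := by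
        rw [hcyc]
        exact List.mem_map.mpr ⟨μ, List.mem_range.mpr (by omega), rfl⟩
      rw [if_pos (by simp [contains_dictB, hmem])]
      have hnd : L.Nodup := by
        apply List.Nodup.map_on _ (List.nodup_range)
        intro i hi j hj hij
        rcases Nat.lt_trichotomy i j with h | h | h
        · exact absurd hij (hinj i j h (List.mem_range.mp hj))
        · exact h
        · exact absurd hij.symm (hinj j i h (List.mem_range.mp hi))
      have hμlt : μ < L.length := by simp [hL]; omega
      have hkey : seqF F s0 (μ + lam) = L[μ] := by
        rw [hcyc]; simp [hL]
      have hget : (dictB L 0).getD (seqF F s0 (μ + lam)) 0 = ((μ : Nat) : Int) := by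
        rw [hkey]
        simpa using getD_dictB_idx L 0 μ hμlt hnd
      rw [hget, keys_dictB]
      simp
    · have hklt : k < μ + lam := by omega
      set L := (List.range k).map (seqF F s0) with hL
      have hnmem : seqF F s0 k ∉ L := by
        intro hmem
        obtain ⟨j, hj, hje⟩ := List.mem_map.mp hmem
        exact hinj j k (List.mem_range.mp hj) hklt hje
      rw [if_neg (by simp [contains_dictB, hnmem])]
      rw [insert_dictB L _ hnmem, ← seqF_succ F s0 k]
      have hL' : L ++ [seqF F s0 k] = (List.range (k + 1)).map (seqF F s0) := by
        rw [List.range_succ, List.map_append]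
        simp [hL]
      rw [hL']
      exact ih (k + 1) (by omega) (by omega)

-- === A's loop runs in lockstep with the reference loop ===

theorem scan_eq_getD (t : String × Int) :
    ∀ (L : List (String × Int)) (j : Nat), t ∈ L →
      frA_scan L t (j : Int) = (dictB L j).getD t 0
  | [], _, h => by simp at h
  | k :: rest, j, h => by
    rw [frA_scan]
    have hz : (k :: rest).zipIdx j = (k, j) :: rest.zipIdx (j + 1) := List.zipIdx_cons
    by_cases hk : k = t
    · subst hk
      simp [dictB, hz, PySem.Dict.getD_eq_get?_getD, PySem.Dict.get?_mk_cons]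
    · have ht : t ∈ rest := by
        rcases List.mem_cons.mp h with h | h
        · exact absurd h.symm hk
        · exact h
      have hrec := scan_eq_getD t rest (j + 1) ht
      rw [if_neg hk, show (j : Int) + 1 = ((j + 1 : Nat) : Int) by push_cast; ring, hrec]
      simp [dictB, hz, PySem.Dict.getD_eq_get?_getD, PySem.Dict.get?_mk_cons, hk]

theorem frAB (nd : PySem.Dict String (String × String)) (directions : List String)
    (hne : directions ≠ []) :
    ∀ (f : Nat) (K : List (String × Int)) (s : String × Int) (stepA : Int),
      (stepA = s.2 ∨ (stepA = -1 ∧ s.2 = (directions.length : Int) - 1)) →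
      0 ≤ s.2 → s.2 < (directions.length : Int) → s ∉ K →
      frA_loop nd directions f (dictA (K ++ [s])) s.1 stepA
        = refLoop (fStep nd directions (directions.length : Int)) (f + 1) (dictB K 0) s := by
  intro f
  induction f with
  | zero =>
    intro K s stepA hinv h0 h1 hK
    rw [frA_loop, refLoop,
      if_neg (show ¬((dictB K 0).contains s = true) by simp [contains_dictB, hK]),
      refLoop]
  | succ f ih =>
    intro K s stepA hinv h0 h1 hK
    have hlen : 0 < (directions.length : Int) := by
      have := List.length_pos_iff.mpr hne; exact_mod_cast this
    have hstep1 : stepA + 1 = s.2 + 1 ∨ (stepA + 1 = 0 ∧ s.2 + 1 = (directions.length : Int)) := by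
      rcases hinv with h | ⟨h, h'⟩ <;> omega
    rw [frA_loop, refLoop,
      if_neg (show ¬((dictB K 0).contains s = true) by simp [contains_dictB, hK])]
    have hmn : 0 ≤ PySem.Int.mod (s.2 + 1) (directions.length : Int) :=
      PySem.Int.mod_nonneg _ hlen
    have hml : PySem.Int.mod (s.2 + 1) (directions.length : Int) < (directions.length : Int) :=
      PySem.Int.mod_lt _ hlen
    have hsd : (match PySem.List.pyGet? directions (stepA + 1) with
        | some d => (stepA + 1, d)
        | none => (0, (PySem.List.pyGet? directions 0).getD ""))
        = (PySem.Int.mod (s.2 + 1) (directions.length : Int),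
           (PySem.List.pyGet? directions (PySem.Int.mod (s.2 + 1) (directions.length : Int))).getD "") := by
      rcases hstep1 with h | ⟨h, h'⟩
      · rcases lt_or_ge (s.2 + 1) (directions.length : Int) with hlt | hge
        · have hm : PySem.Int.mod (s.2 + 1) (directions.length : Int) = s.2 + 1 := by
            rw [PySem.Int.mod_eq_emod_of_pos hlen, Int.emod_eq_of_lt (by omega) hlt]
          obtain ⟨d, hd⟩ := pyGet?_total (by omega : (0:Int) ≤ s.2 + 1) hlt
          rw [h, hd, hm, hd]
          rfl
        · have h2 : s.2 + 1 = (directions.length : Int) := by omega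
          have hm : PySem.Int.mod (s.2 + 1) (directions.length : Int) = 0 := by
            rw [h2, PySem.Int.mod_eq_emod_of_pos hlen, Int.emod_self]
          rw [h, hm, h2, pyGet?_oob (by omega) le_rfl]
      · have hm : PySem.Int.mod (s.2 + 1) (directions.length : Int) = 0 := by
          rw [h', PySem.Int.mod_eq_emod_of_pos hlen, Int.emod_self]
        obtain ⟨d0, hd0⟩ := pyGet?_total le_rfl hlen
        rw [h, hd0, hm, hd0]
        rfl
    rw [hsd]
    simp only []
    set t2 : Int := PySem.Int.mod (s.2 + 1) (directions.length : Int) with ht2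
    set nx : String := (if (PySem.List.pyGet? directions t2).getD "" = "L"
      then ((nd.get? s.1).getD ("", "")).1 else ((nd.get? s.1).getD ("", "")).2) with hnx
    have hF : fStep nd directions (directions.length : Int) s = (nx, t2) := rfl
    rw [insert_dictB K s hK, hF]
    by_cases hmem : (nx, t2) ∈ K ++ [s]
    · rw [refLoop]
      rw [if_pos (show (dictA (K ++ [s])).contains (nx, t2) = true by
          simp [contains_dictA, hmem]),
        if_pos (show (dictB (K ++ [s]) 0).contains (nx, t2) = true by
          simp [contains_dictB, hmem])]
      have hscan := scan_eq_getD (nx, t2) (K ++ [s]) 0 hmem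
      simp only [Nat.cast_zero] at hscan
      simp only [keys_dictA, keys_dictB, hscan]
    · rw [if_neg (show ¬((dictA (K ++ [s])).contains (nx, t2) = true) by
          simp [contains_dictA, hmem]),
        insert_dictA _ _ hmem]
      exact ih (K ++ [s]) (nx, t2) t2 (Or.inl rfl) hmn hml hmem

-- === closure of the orbit inside the node map (for the pigeonhole bound) ===

theorem get?_foldl_insert_mem {κ ν : Type} [BEq κ] [LawfulBEq κ] [DecidableEq κ] :
    ∀ (ps : List (κ × ν)) (d : PySem.Dict κ ν) (k : κ) (v : ν),
      (ps.foldl (fun a p => a.insert p.1 p.2) d).get? k = some v → (k, v) ∈ ps ∨ d.get? k = some v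
  | [], d, k, v, h => Or.inr h
  | p :: rest, d, k, v, h => by
    rcases get?_foldl_insert_mem rest (d.insert p.1 p.2) k v h with h1 | h1
    · exact Or.inl (List.mem_cons_of_mem _ h1)
    · rw [PySem.Dict.get?_insert] at h1
      by_cases hk : k = p.1
      · subst hk
        rw [if_pos rfl] at h1
        have hv2 : v = p.2 := by injection h1 with h; exact h.symm
        exact Or.inl (by rw [hv2]; simp)
      · rw [if_neg hk] at h1
        exact Or.inr h1

theorem get?_foldl_insert_isSome {κ ν : Type} [BEq κ] [LawfulBEq κ] [DecidableEq κ] :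
    ∀ (ps : List (κ × ν)) (d : PySem.Dict κ ν) (k : κ),
      k ∈ ps.map (·.1) ∨ ((d.get? k).isSome = true) →
      (((ps.foldl (fun a p => a.insert p.1 p.2) d).get? k).isSome = true)
  | [], d, k, h => by
    rcases h with h | h
    · simp at h
    · exact h
  | p :: rest, d, k, h => by
    apply get?_foldl_insert_isSome rest (d.insert p.1 p.2) k
    by_cases hk : k = p.1
    · right
      rw [PySem.Dict.get?_insert, if_pos hk]
      rfl
    · rcases h with h | h
      · rcases List.mem_map.mp h with ⟨q, hq, hqe⟩
        rcases List.mem_cons.mp hq with h' | h'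
        · exact absurd (hqe ▸ h' ▸ rfl) hk
        · exact Or.inl (List.mem_map.mpr ⟨q, h', hqe⟩)
      · right
        rw [PySem.Dict.get?_insert, if_neg hk]
        exact h

theorem orbit_closed (nodes : List (String × String × String)) (directions : List String)
    (node : String) (hne : directions ≠ []) (hnode : node ∈ nodes.map (·.1))
    (hcl : ∀ t ∈ nodes, t.2.1 ∈ nodes.map (·.1) ∧ t.2.2 ∈ nodes.map (·.1)) :
    ∀ k, (seqF (fStep (pvNodesDict nodes) directions (directions.length : Int))
            (node, (directions.length : Int) - 1) k).1 ∈ nodes.map (·.1) ∧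
         0 ≤ (seqF (fStep (pvNodesDict nodes) directions (directions.length : Int))
            (node, (directions.length : Int) - 1) k).2 ∧
         (seqF (fStep (pvNodesDict nodes) directions (directions.length : Int))
            (node, (directions.length : Int) - 1) k).2 < (directions.length : Int) := by
  have hlen : 0 < (directions.length : Int) := by
    have := List.length_pos_iff.mpr hne; exact_mod_cast this
  intro k
  induction k with
  | zero =>
    refine ⟨hnode, ?_, ?_⟩ <;> simp [seqF] <;> omega
  | succ k ih =>
    obtain ⟨h1, h2, h3⟩ := ih
    rw [seqF_succ]
    set x := seqF (fStep (pvNodesDict nodes) directions (directions.length : Int))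
      (node, (directions.length : Int) - 1) k
    have hsome : (((pvNodesDict nodes).get? x.1).isSome = true) := by
      apply get?_foldl_insert_isSome
      left
      rcases List.mem_map.mp h1 with ⟨t, ht, hte⟩
      exact List.mem_map.mpr ⟨(t.1, (t.2.1, t.2.2)), List.mem_map.mpr ⟨t, ht, rfl⟩, hte⟩
    obtain ⟨v, hv⟩ := Option.isSome_iff_exists.mp hsome
    have hvmem : (x.1, v) ∈ nodes.map (fun t => (t.1, (t.2.1, t.2.2))) := by
      rcases get?_foldl_insert_mem _ _ _ _ hv with h | h
      · exact h
      · rw [PySem.Dict.get?_empty] at h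
        exact absurd h (by simp)
    rcases List.mem_map.mp hvmem with ⟨t, ht, hte⟩
    have hx1 : t.1 = x.1 := congrArg Prod.fst hte
    have hv12 : v = (t.2.1, t.2.2) := (congrArg Prod.snd hte).symm
    refine ⟨?_, PySem.Int.mod_nonneg _ hlen, PySem.Int.mod_lt _ hlen⟩
    show (fStep (pvNodesDict nodes) directions (directions.length : Int) x).1 ∈ nodes.map (·.1)
    simp only [fStep, hv, hv12]
    obtain ⟨hc1, hc2⟩ := hcl t ht
    split
    · exact hc1
    · exact hc2

-- pigeonhole: the orbit repeats within nodes.length * directions.length steps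
theorem orbit_repeats (nodes : List (String × String × String)) (directions : List String)
    (node : String) (hne : directions ≠ []) (hnode : node ∈ nodes.map (·.1))
    (hcl : ∀ t ∈ nodes, t.2.1 ∈ nodes.map (·.1) ∧ t.2.2 ∈ nodes.map (·.1)) :
    ∃ k, k ≤ nodes.length * directions.length ∧
      ∃ j, j < k ∧ seqF (fStep (pvNodesDict nodes) directions (directions.length : Int))
          (node, (directions.length : Int) - 1) j
        = seqF (fStep (pvNodesDict nodes) directions (directions.length : Int))
          (node, (directions.length : Int) - 1) k := by
  have hmaps : ∀ a ∈ Finset.range (nodes.length * directions.length + 1),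
      seqF (fStep (pvNodesDict nodes) directions (directions.length : Int))
          (node, (directions.length : Int) - 1) a ∈
        ((nodes.map (·.1)).toFinset ×ˢ
          ((Finset.range directions.length).image (fun j : Nat => (j : Int)))) := by
    intro a _
    obtain ⟨h1, h2, h3⟩ := orbit_closed nodes directions node hne hnode hcl a
    refine Finset.mem_product.mpr ⟨List.mem_toFinset.mpr h1, ?_⟩
    refine Finset.mem_image.mpr
      ⟨(seqF (fStep (pvNodesDict nodes) directions (directions.length : Int))
          (node, (directions.length : Int) - 1) a).2.toNat, Finset.mem_range.mpr (by omega),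
        by omega⟩
  have hcard : ((nodes.map (·.1)).toFinset ×ˢ
        ((Finset.range directions.length).image (fun j : Nat => (j : Int)))).card <
      (Finset.range (nodes.length * directions.length + 1)).card := by
    have h1 : ((nodes.map (·.1)).toFinset ×ˢ
        ((Finset.range directions.length).image (fun j : Nat => (j : Int)))).card ≤
        nodes.length * directions.length := by
      rw [Finset.card_product]
      apply Nat.mul_le_mul
      · exact le_trans (List.toFinset_card_le _) (by simp)
      · exact le_trans (Finset.card_image_le) (by simp)
    simp only [Finset.card_range]
    omega
  obtain ⟨x, hx, y, hy, hxy, hfe⟩ :=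
    Finset.exists_ne_map_eq_of_card_lt_of_maps_to hcard hmaps
  rcases Nat.lt_or_ge x y with h | h
  · exact ⟨y, by have := Finset.mem_range.mp hy; omega, x, h, hfe⟩
  · have hyx : y < x := by omega
    exact ⟨x, by have := Finset.mem_range.mp hx; omega, y, hyx, hfe.symm⟩

-- drop μ of the first μ+lam orbit states is the cycle segment
theorem drop_map_range (g : Nat → String × Int) (μ lam : Nat) :
    ((List.range (μ + lam)).map g).drop μ = (List.range lam).map (fun j => g (μ + j)) := by
  apply List.ext_getElem
  · simp
  · intro i h1 h2
    simp

-- extract the ρ-shape (tail μ, cycle lam) from any witnessed repeat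
theorem exists_rho (F : (String × Int) → (String × Int)) (s0 : String × Int) (Kb : Nat)
    (hrep : ∃ j k, j < k ∧ k ≤ Kb ∧ seqF F s0 j = seqF F s0 k) :
    ∃ μ lam, 1 ≤ lam ∧ μ + lam ≤ Kb ∧ seqF F s0 (μ + lam) = seqF F s0 μ ∧
      ∀ i j, i < j → j < μ + lam → seqF F s0 i ≠ seqF F s0 j := by
  obtain ⟨j0, k0, hjk, hk0, he0⟩ := hrep
  have hP : ∃ k, ∃ j, j < k ∧ seqF F s0 j = seqF F s0 k := ⟨k0, j0, hjk, he0⟩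
  obtain ⟨j1, hj1, he1⟩ := Nat.find_spec hP
  have hQ : ∃ j, seqF F s0 j = seqF F s0 (Nat.find hP) ∧ j < Nat.find hP := ⟨j1, he1, hj1⟩
  obtain ⟨hμe, hμlt⟩ := Nat.find_spec hQ
  refine ⟨Nat.find hQ, Nat.find hP - Nat.find hQ, by omega, ?_, ?_, ?_⟩
  · have : Nat.find hP ≤ k0 := Nat.find_le ⟨j0, hjk, he0⟩
    omega
  · rw [show Nat.find hQ + (Nat.find hP - Nat.find hQ) = Nat.find hP from by omega]
    exact hμe.symm
  · intro i j hij hj heq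
    have hjm : j < Nat.find hP := by omega
    exact (Nat.find_min hP hjm) ⟨i, hij, heq⟩

-- Source B's whole pipeline, evaluated on the orbit
theorem floydAll (F : (String × Int) → (String × Int)) (s0 : String × Int) (μ lam fuel : Nat)
    (hlam : 1 ≤ lam) (hcyc : seqF F s0 (μ + lam) = seqF F s0 μ)
    (hinj : ∀ i j, i < j → j < μ + lam → seqF F s0 i ≠ seqF F s0 j)
    (hfuel : μ + lam ≤ fuel) :
    (buildCycle F
        (floyd3 F fuel (floyd2 F fuel s0 (floyd1 F fuel (F s0) (F (F s0))) 0).1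
          (F (floyd2 F fuel s0 (floyd1 F fuel (F s0) (F (F s0))) 0).1) 1).toNat
        (floyd2 F fuel s0 (floyd1 F fuel (F s0) (F (F s0))) 0).1,
      (floyd2 F fuel s0 (floyd1 F fuel (F s0) (F (F s0))) 0).2)
      = (((List.range (μ + lam)).map (seqF F s0)).drop μ, (μ : Int)) := by
  have hdiv : lam * (μ / lam + 1) ≤ μ + lam := by
    have h := Nat.div_mul_le_self μ lam
    rw [Nat.mul_add, Nat.mul_one, Nat.mul_comm]
    omega
  have hdiv1 : 1 ≤ lam * (μ / lam + 1) :=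
    le_trans hlam (Nat.le_mul_of_pos_right lam (Nat.succ_pos (μ / lam)))
  obtain ⟨j, hj1, hjd, hfl1⟩ :=
    floyd1_eq F s0 μ lam hlam hcyc hinj fuel 1 le_rfl hdiv1 (Nat.add_le_add_right (le_trans hdiv hfuel) 1)
  have hfl1' : floyd1 F fuel (F s0) (F (F s0)) = seqF F s0 (2 * j) := hfl1
  rw [hfl1']
  have hfl2 : floyd2 F fuel s0 (seqF F s0 (2 * j)) 0 = (seqF F s0 μ, (μ : Int)) :=
    floyd2_eq F s0 μ lam hlam hcyc hinj (2 * j) (by omega) (Dvd.dvd.mul_left hjd 2)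
      fuel 0 (by omega) (by omega)
  rw [hfl2]
  have hstep : F (seqF F s0 μ, (μ : Int)).1 = seqF F s0 (μ + 1) := (seqF_succ F s0 μ).symm
  rw [hstep]
  have hfl3 : floyd3 F fuel (seqF F s0 μ, (μ : Int)).1 (seqF F s0 (μ + 1)) 1 = (lam : Int) :=
    floyd3_eq F s0 μ lam hlam hcyc hinj fuel 1 le_rfl hlam (by omega)
  rw [hfl3]
  have htn : ((lam : Int)).toNat = lam := by simp
  rw [htn]
  have hbc : buildCycle F lam (seqF F s0 μ, (μ : Int)).1 =
      (List.range lam).map (fun j => seqF F s0 (μ + j)) := buildCycle_eq F s0 lam μ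
  rw [hbc, drop_map_range]

-- ===== VERDICT (by name: the statement is the Claim_ definition above) =====
theorem find_repeating_cycle_spec : Claim_equal_find_repeating_cycle := by
  intro nodes directions node _ hpre
  obtain ⟨hne, hnode, hcl⟩ := hpre
  have hlen : 0 < (directions.length : Int) := by
    have := List.length_pos_iff.mpr hne; exact_mod_cast this
  obtain ⟨k0, hk0, j0, hj0, he0⟩ := orbit_repeats nodes directions node hne hnode hcl
  obtain ⟨μ, lam, hlam, hbound, hcyc, hinj⟩ :=
    exists_rho (fStep (pvNodesDict nodes) directions (directions.length : Int))
      (node, (directions.length : Int) - 1) (nodes.length * directions.length)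
      ⟨j0, k0, hj0, hk0, he0⟩
  unfold Spec_find_repeating_cycle
  have hA : find_repeating_cycle nodes directions node =
      (((List.range (μ + lam)).map
          (seqF (fStep (pvNodesDict nodes) directions (directions.length : Int))
            (node, (directions.length : Int) - 1))).drop μ, (μ : Int)) := by
    unfold find_repeating_cycle
    have h0 : (PySem.Dict.empty).insert (node, (directions.length : Int) - 1) ()
        = dictA ([] ++ [(node, (directions.length : Int) - 1)]) := by
      apply PySem.Dict.ext
      rw [PySem.Dict.items_insert_of_not_contains _ _ (by simp [PySem.Dict.contains_empty])]
      simp [dictA, PySem.Dict.empty]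
    rw [h0, frAB (pvNodesDict nodes) directions hne
      ((2 * nodes.length + 2) * (directions.length + 1) + 3)
      [] (node, (directions.length : Int) - 1) (-1)
      (Or.inr ⟨rfl, rfl⟩) (by omega) (by omega) (by simp)]
    have hKA : nodes.length * directions.length ≤ (2 * nodes.length + 2) * (directions.length + 1) :=
      Nat.mul_le_mul (by omega) (by omega)
    exact refLoop_spec (fStep (pvNodesDict nodes) directions (directions.length : Int))
      (node, (directions.length : Int) - 1) μ lam hlam hcyc hinj
      ((2 * nodes.length + 2) * (directions.length + 1) + 3 + 1) 0 (by omega) (by omega)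
  have hB : find_repeating_cycle_alt nodes directions node =
      (((List.range (μ + lam)).map
          (seqF (fStep (pvNodesDict nodes) directions (directions.length : Int))
            (node, (directions.length : Int) - 1))).drop μ, (μ : Int)) := by
    unfold find_repeating_cycle_alt
    exact floydAll (fStep (pvNodesDict nodes) directions (directions.length : Int))
      (node, (directions.length : Int) - 1) μ lam (nodes.length * directions.length + 2)
      hlam hcyc hinj (by omega)
  rw [hA, hB]
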